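-- pv_equiv track=rewrite | github.com/marilia-cr-silva/nlp_datasets | stats/stats.py | build_task_dataset_map
-- ===== SOURCE A (Python) =====
-- from typing import Any, Dict, List, Set
--
-- def build_task_dataset_map(file_dataset_map: Dict[str, List[str]]):
--     tasks = ["fn", "hs", "sa", "sd"]
--
--     task_dataset_map = {}
--
--     for task in tasks:
--         task_dataset_map[task] = {}
--
--         current_datasets = [d for d in file_dataset_map.keys() if d.startswith(task)]
--
--         for dataset in current_datasets:
--             task_dataset_map[task][dataset] = file_dataset_map[dataset]
--
--     return task_dataset_map
-- ===== SOURCE B (Python) =====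
-- def build_task_dataset_map(file_dataset_map):
--     task_dataset_map = {task: {} for task in ("fn", "hs", "sa", "sd")}
--     for dataset, value in file_dataset_map.items():
--         group = task_dataset_map.get(dataset[:2])
--         if group is not None:
--             group[dataset] = value
--     return task_dataset_map
-- ===== Notes on version B (the rewrite author's own statement) =====
-- stated objective: simpler
-- what changed: B pre-seeds the four task keys and makes one grouping pass over file_dataset_map.items(), dispatching each dataset by its 2-character prefix, instead of A's four separate filtering scans over the keys each followed by per-key dict lookups.
import Mathlib
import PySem

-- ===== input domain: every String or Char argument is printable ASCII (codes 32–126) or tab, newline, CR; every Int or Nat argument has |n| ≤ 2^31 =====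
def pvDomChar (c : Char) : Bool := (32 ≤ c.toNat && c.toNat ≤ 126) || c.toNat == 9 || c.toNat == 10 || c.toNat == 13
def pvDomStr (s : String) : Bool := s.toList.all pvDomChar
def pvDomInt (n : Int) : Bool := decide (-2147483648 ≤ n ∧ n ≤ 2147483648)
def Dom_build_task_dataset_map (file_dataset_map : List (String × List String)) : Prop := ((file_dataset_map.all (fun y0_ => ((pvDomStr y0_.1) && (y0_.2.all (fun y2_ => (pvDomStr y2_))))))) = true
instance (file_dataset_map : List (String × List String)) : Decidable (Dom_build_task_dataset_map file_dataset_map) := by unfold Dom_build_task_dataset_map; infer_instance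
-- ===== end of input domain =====

-- B replaces A's four filtering scans over the keys by a single grouping pass over the items
-- (objective: simpler; same return value on every dict, i.e. association list with distinct keys).

-- ===== PORT A =====
-- the input dict is its association list: `.keys()` is the list of first components and
-- `file_dataset_map[dataset]` is first-match lookup (PySem.Dict.getD; the key is always present)
def build_task_dataset_map (file_dataset_map : List (String × List String)) : List (String × List (String × List String)) :=
  let tasks : List String := ["fn", "hs", "sa", "sd"]
  let tdm : PySem.Dict String (PySem.Dict String (List String)) :=
    tasks.foldl (fun tdm task =>
      -- task_dataset_map[task] = {}
      let tdm1 := tdm.insert task PySem.Dict.empty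
      let current_datasets := (file_dataset_map.map Prod.fst).filter
        (fun d => PySem.Str.startswith d task)
      -- task_dataset_map[task][dataset] = file_dataset_map[dataset]
      current_datasets.foldl (fun tdm2 dataset =>
        tdm2.modify task PySem.Dict.empty
          (fun inn => inn.insert dataset ((PySem.Dict.mk file_dataset_map).getD dataset []))) tdm1)
      PySem.Dict.empty
  tdm.items.map (fun p => (p.1, p.2.items))

-- ===== PORT B =====
def build_task_dataset_map_alt (file_dataset_map : List (String × List String)) : List (String × List (String × List String)) :=
  let init : PySem.Dict String (PySem.Dict String (List String)) :=
    PySem.Dict.mk [("fn", PySem.Dict.empty), ("hs", PySem.Dict.empty),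
                   ("sa", PySem.Dict.empty), ("sd", PySem.Dict.empty)]
  let tdm := file_dataset_map.foldl (fun tdm p =>
    -- group = task_dataset_map.get(dataset[:2]); if group is not None: group[dataset] = value
    let pre := PySem.Str.slice p.1 none (some 2)
    if (tdm.get? pre).isSome then
      tdm.modify pre PySem.Dict.empty (fun inn => inn.insert p.1 p.2)
    else tdm) init
  tdm.items.map (fun p => (p.1, p.2.items))

-- ===== PRECONDITION & SPEC =====
-- Pre_ excludes association lists with duplicate keys: they cannot arise from the function's
-- actual argument (a Python dict), and on them first-vs-last-value behaviour is accidental.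
def Pre_build_task_dataset_map (file_dataset_map : List (String × List String)) : Prop :=
  (file_dataset_map.map Prod.fst).Nodup
instance (file_dataset_map : List (String × List String)) : Decidable (Pre_build_task_dataset_map file_dataset_map) := by unfold Pre_build_task_dataset_map; infer_instance
def pvWitness_build_task_dataset_map : (List (String × List String)) :=
  [("fn_a", ["x"]), ("sd_b", ["y", "z"]), ("qq", [])]
def Spec_build_task_dataset_map (file_dataset_map : List (String × List String)) (out : List (String × List (String × List String))) : Prop := out = build_task_dataset_map_alt file_dataset_map
instance (file_dataset_map : List (String × List String)) (out : List (String × List (String × List String))) : Decidable (Spec_build_task_dataset_map file_dataset_map out) := by unfold Spec_build_task_dataset_map; infer_instance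

-- ===== CLAIM (what is proved, stated in full; the proofs are below) =====
def Claim_equal_build_task_dataset_map : Prop := ∀ (file_dataset_map : List (String × List String)), Dom_build_task_dataset_map file_dataset_map → Pre_build_task_dataset_map file_dataset_map → Spec_build_task_dataset_map file_dataset_map (build_task_dataset_map file_dataset_map)

-- ===== LEMMAS AND PROOFS =====

-- A's inner loop only rewrites the entry at `task`
theorem pvA_inner_loop (l : List String) (g : String → List String)
    (d : PySem.Dict String (PySem.Dict String (List String))) (t : String)
    (inn0 : PySem.Dict String (List String)) :
    l.foldl (fun td ds => td.modify t PySem.Dict.empty (fun inn => inn.insert ds (g ds)))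
        (d.insert t inn0)
      = d.insert t (l.foldl (fun inn ds => inn.insert ds (g ds)) inn0) := by
  induction l generalizing inn0 with
  | nil => rfl
  | cons x xs ih =>
      simp only [List.foldl_cons, PySem.Dict.modify, PySem.Dict.getD_insert_self,
        PySem.Dict.insert_insert_self]
      exact ih _

-- B's per-task accumulation
def pvExt (d : PySem.Dict String (List String)) (t : String)
    (xs : List (String × List String)) : PySem.Dict String (List String) :=
  xs.foldl (fun inn p =>
    if PySem.Str.slice p.1 none (some 2) = t then inn.insert p.1 p.2 else inn) d

theorem pvGet?_none (d1 d2 d3 d4 : PySem.Dict String (List String)) (t : String)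
    (h1 : t ≠ "fn") (h2 : t ≠ "hs") (h3 : t ≠ "sa") (h4 : t ≠ "sd") :
    (PySem.Dict.mk [("fn", d1), ("hs", d2), ("sa", d3), ("sd", d4)]).get? t = none := by
  simp only [PySem.Dict.get?_mk_cons, beq_iff_eq]
  rw [if_neg (fun h => h1 h.symm), if_neg (fun h => h2 h.symm), if_neg (fun h => h3 h.symm),
      if_neg (fun h => h4 h.symm)]
  rfl

-- B's single pass splits into four independent per-task accumulations
theorem pvB_split (xs : List (String × List String))
    (d1 d2 d3 d4 : PySem.Dict String (List String)) :
    xs.foldl (fun tdm p =>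
        let pre := PySem.Str.slice p.1 none (some 2)
        if (tdm.get? pre).isSome then
          tdm.modify pre PySem.Dict.empty (fun inn => inn.insert p.1 p.2)
        else tdm)
      (PySem.Dict.mk [("fn", d1), ("hs", d2), ("sa", d3), ("sd", d4)])
      = PySem.Dict.mk [("fn", pvExt d1 "fn" xs), ("hs", pvExt d2 "hs" xs),
                       ("sa", pvExt d3 "sa" xs), ("sd", pvExt d4 "sd" xs)] := by
  induction xs generalizing d1 d2 d3 d4 with
  | nil => rfl
  | cons x xs ih =>
      obtain ⟨k, v⟩ := x
      simp only [List.foldl_cons, pvExt]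
      by_cases h1 : PySem.Str.slice k none (some 2) = "fn"
      · rw [h1]
        rw [show ((PySem.Dict.mk [("fn", d1), ("hs", d2), ("sa", d3), ("sd", d4)]).get?
              "fn").isSome = true from rfl]
        simp only [PySem.Dict.modify,
          show (PySem.Dict.mk [("fn", d1), ("hs", d2), ("sa", d3), ("sd", d4)]).getD "fn"
              PySem.Dict.empty = d1 from rfl,
          show ∀ w, (PySem.Dict.mk [("fn", d1), ("hs", d2), ("sa", d3), ("sd", d4)]).insert "fn" w
              = PySem.Dict.mk [("fn", w), ("hs", d2), ("sa", d3), ("sd", d4)] from fun _ => rfl,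
          if_neg (by decide : ¬("fn" : String) = "hs"),
          if_neg (by decide : ¬("fn" : String) = "sa"),
          if_neg (by decide : ¬("fn" : String) = "sd"),
          if_true]
        exact ih _ _ _ _
      by_cases h2 : PySem.Str.slice k none (some 2) = "hs"
      · rw [h2]
        rw [show ((PySem.Dict.mk [("fn", d1), ("hs", d2), ("sa", d3), ("sd", d4)]).get?
              "hs").isSome = true from rfl]
        simp only [PySem.Dict.modify,
          show (PySem.Dict.mk [("fn", d1), ("hs", d2), ("sa", d3), ("sd", d4)]).getD "hs"
              PySem.Dict.empty = d2 from rfl,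
          show ∀ w, (PySem.Dict.mk [("fn", d1), ("hs", d2), ("sa", d3), ("sd", d4)]).insert "hs" w
              = PySem.Dict.mk [("fn", d1), ("hs", w), ("sa", d3), ("sd", d4)] from fun _ => rfl,
          if_neg (by decide : ¬("hs" : String) = "fn"),
          if_neg (by decide : ¬("hs" : String) = "sa"),
          if_neg (by decide : ¬("hs" : String) = "sd"),
          if_true]
        exact ih _ _ _ _
      by_cases h3 : PySem.Str.slice k none (some 2) = "sa"
      · rw [h3]
        rw [show ((PySem.Dict.mk [("fn", d1), ("hs", d2), ("sa", d3), ("sd", d4)]).get?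
              "sa").isSome = true from rfl]
        simp only [PySem.Dict.modify,
          show (PySem.Dict.mk [("fn", d1), ("hs", d2), ("sa", d3), ("sd", d4)]).getD "sa"
              PySem.Dict.empty = d3 from rfl,
          show ∀ w, (PySem.Dict.mk [("fn", d1), ("hs", d2), ("sa", d3), ("sd", d4)]).insert "sa" w
              = PySem.Dict.mk [("fn", d1), ("hs", d2), ("sa", w), ("sd", d4)] from fun _ => rfl,
          if_neg (by decide : ¬("sa" : String) = "fn"),
          if_neg (by decide : ¬("sa" : String) = "hs"),
          if_neg (by decide : ¬("sa" : String) = "sd"),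
          if_true]
        exact ih _ _ _ _
      by_cases h4 : PySem.Str.slice k none (some 2) = "sd"
      · rw [h4]
        rw [show ((PySem.Dict.mk [("fn", d1), ("hs", d2), ("sa", d3), ("sd", d4)]).get?
              "sd").isSome = true from rfl]
        simp only [PySem.Dict.modify,
          show (PySem.Dict.mk [("fn", d1), ("hs", d2), ("sa", d3), ("sd", d4)]).getD "sd"
              PySem.Dict.empty = d4 from rfl,
          show ∀ w, (PySem.Dict.mk [("fn", d1), ("hs", d2), ("sa", d3), ("sd", d4)]).insert "sd" w
              = PySem.Dict.mk [("fn", d1), ("hs", d2), ("sa", d3), ("sd", w)] from fun _ => rfl,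
          if_neg (by decide : ¬("sd" : String) = "fn"),
          if_neg (by decide : ¬("sd" : String) = "hs"),
          if_neg (by decide : ¬("sd" : String) = "sa"),
          if_true]
        exact ih _ _ _ _
      · rw [pvGet?_none d1 d2 d3 d4 _ h1 h2 h3 h4]
        simp only [Option.isSome_none, Bool.false_eq_true, if_false,
          if_neg h1, if_neg h2, if_neg h3, if_neg h4]
        exact ih _ _ _ _

-- startswith by a two-character task tag is the length-2-prefix test B uses
theorem pvStartswith_eq (d t : String) (ht : t.toList.length = 2) :
    (PySem.Str.startswith d t = true ↔ PySem.Str.slice d none (some 2) = t) := by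
  rw [← String.toList_inj, PySem.Str.startswith_eq, PySem.Chars.startswith_iff,
      List.prefix_iff_eq_take, ht]
  simp only [PySem.Str.toList_slice, PySem.Chars.slice_eq_listSlice]
  rw [show PySem.List.slice d.toList none (some 2) = d.toList.take (2:Int).toNat from
      PySem.List.slice_to _ (by norm_num)]
  norm_num [eq_comm]
  exact Iff.rfl

-- A's per-task dict (filter the keys, then look each value up) equals B's per-task accumulation
theorem pvInner_eq (m : List (String × List String)) (h : (m.map Prod.fst).Nodup)
    (t : String) (ht : t.toList.length = 2) :
    ((m.map Prod.fst).filter (fun d => PySem.Str.startswith d t)).foldl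
        (fun inn ds => inn.insert ds ((PySem.Dict.mk m).getD ds []))
        PySem.Dict.empty
      = pvExt PySem.Dict.empty t m := by
  rw [List.filter_map, List.foldl_map, List.foldl_filter]
  unfold pvExt
  apply PySem.List.foldl_congr_mem
  intro acc p hp
  rcases p with ⟨k, v⟩
  have hk : (PySem.Dict.mk m).getD k [] = v := by
    apply PySem.Dict.getD_of_mem_items
    · simpa [PySem.Dict.items] using hp
    · simpa [PySem.Dict.keys, PySem.Dict.items] using h
  rw [hk]
  by_cases hs : PySem.Str.startswith k t = true
  · rw [if_pos, if_pos ((pvStartswith_eq k t ht).mp hs)]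
    simpa using hs
  · rw [if_neg, if_neg (fun hh => hs ((pvStartswith_eq k t ht).mpr hh))]
    simpa using hs

-- ===== VERDICT (by name: the statement is the Claim_ definition above) =====
theorem build_task_dataset_map_spec : Claim_equal_build_task_dataset_map := by
  intro m _ hpre
  unfold Spec_build_task_dataset_map build_task_dataset_map build_task_dataset_map_alt
  dsimp only
  simp only [List.foldl_cons, List.foldl_nil]
  rw [pvA_inner_loop, pvA_inner_loop, pvA_inner_loop, pvA_inner_loop, pvB_split]
  rw [show ∀ a b c e : PySem.Dict String (List String),
        (((PySem.Dict.empty.insert "fn" a).insert "hs" b).insert "sa" c).insert "sd" e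
          = PySem.Dict.mk [("fn", a), ("hs", b), ("sa", c), ("sd", e)] from
      fun _ _ _ _ => rfl]
  rw [pvInner_eq m hpre "fn" (by decide), pvInner_eq m hpre "hs" (by decide),
      pvInner_eq m hpre "sa" (by decide), pvInner_eq m hpre "sd" (by decide)]
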